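-- pv_equiv track=rewrite | github.com/sameer6699/HackerRank-Solved-Questions | Project_Eluar#4/Problem-4.py | largest_palindrome_less_than
-- ===== SOURCE A (Python) =====
-- def is_palindrome(num):
--     return str(num) == str(num)[::-1]
--
-- def largest_palindrome_less_than(N):
--     max_palindrome = -1
--     for i in range(999, 99, -1):
--         for j in range(i, 99, -1):
--             product = i * j
--             if product < N and is_palindrome(product):
--                 max_palindrome = max(max_palindrome, product)
--     return max_palindrome
-- ===== SOURCE B (Python) =====
-- def largest_palindrome_less_than(N):
--     start = min(N - 1, 999 * 999)
--     for p in range(start, 9999, -1):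
--         s = str(p)
--         if s == s[::-1]:
--             for a in range(100, 1000):
--                 if p % a == 0 and 100 <= p // a < 1000:
--                     return p
--     return -1
-- ===== Notes on version B (the rewrite author's own statement) =====
-- stated objective: faster
-- what changed: Instead of enumerating every ordered pair of three-digit factors and folding a running max, B scans candidate values downward from the capped upper bound and returns the first palindrome that admits a three-digit divisor pair, early-exiting at the answer.
import Mathlib
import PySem

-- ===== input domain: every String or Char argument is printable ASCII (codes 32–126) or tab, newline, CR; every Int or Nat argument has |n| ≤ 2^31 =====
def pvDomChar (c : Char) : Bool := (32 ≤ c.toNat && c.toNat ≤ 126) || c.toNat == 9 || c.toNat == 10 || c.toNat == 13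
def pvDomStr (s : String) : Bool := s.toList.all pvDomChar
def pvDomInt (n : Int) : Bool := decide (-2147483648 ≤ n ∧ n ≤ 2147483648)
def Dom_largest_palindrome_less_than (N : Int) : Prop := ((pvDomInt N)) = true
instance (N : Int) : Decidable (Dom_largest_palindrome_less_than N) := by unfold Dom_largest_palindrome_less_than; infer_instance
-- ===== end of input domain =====

-- B replaces A's exhaustive scan over all 3-digit factor pairs by a downward scan over
-- palindrome candidates below N that stops at the first one with a 3-digit factorisation
-- (objective: faster on typical inputs by early exit).

-- ===== PORT A =====
-- str(num) == str(num)[::-1]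
def is_palindrome (num : Int) : Bool :=
  PySem.Int.toStr num == ((PySem.Str.slice? (PySem.Int.toStr num) none none (-1)).getD "")

def largest_palindrome_less_than (N : Int) : Int :=
  (PySem.List.pyRange 999 99 (-1)).foldl (fun mp i =>
    (PySem.List.pyRange i 99 (-1)).foldl (fun mp j =>
      let product := i * j
      if product < N && is_palindrome product then max mp product else mp) mp) (-1)

-- ===== PORT B =====
-- s == s[::-1] (B's inline palindrome test)
def pvPalB (p : Int) : Bool :=
  PySem.Int.toStr p == ((PySem.Str.slice? (PySem.Int.toStr p) none none (-1)).getD "")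

-- 'for a in range(100, 1000): if p % a == 0 and 100 <= p // a < 1000: return p' as an any-scan
def pvHas3Factor (p : Int) : Bool :=
  (PySem.List.pyRange 100 1000 1).any (fun a =>
    PySem.Int.mod p a == 0 && (100 ≤ PySem.Int.floordiv p a && PySem.Int.floordiv p a < 1000))

def largest_palindrome_less_than_alt (N : Int) : Int :=
  match (PySem.List.pyRange (min (N - 1) (999 * 999)) 9999 (-1)).find?
      (fun p => pvPalB p && pvHas3Factor p) with
  | some p => p
  | none => -1

-- ===== PRECONDITION & SPEC =====
def Spec_largest_palindrome_less_than (N : Int) (out : Int) : Prop := out = largest_palindrome_less_than_alt N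
instance (N : Int) (out : Int) : Decidable (Spec_largest_palindrome_less_than N out) := by unfold Spec_largest_palindrome_less_than; infer_instance

-- ===== CLAIM (what is proved, stated in full; the proofs are below) =====
def Claim_equal_largest_palindrome_less_than : Prop := ∀ (N : Int), Dom_largest_palindrome_less_than N → Spec_largest_palindrome_less_than N (largest_palindrome_less_than N)

-- ===== LEMMAS AND PROOFS =====

-- the flattened list of products A inspects
def pvProds : List Int :=
  (PySem.List.pyRange 999 99 (-1)).flatMap (fun i =>
    (PySem.List.pyRange i 99 (-1)).map (fun j => i * j))

lemma pvMem_prods {p : Int} :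
    p ∈ pvProds ↔ ∃ i j : Int, 100 ≤ j ∧ j ≤ i ∧ i ≤ 999 ∧ p = i * j := by
  simp only [pvProds, List.mem_flatMap, List.mem_map, PySem.List.mem_pyRange_neg_one]
  constructor
  · rintro ⟨i, ⟨hi1, hi2⟩, j, ⟨hj1, hj2⟩, rfl⟩
    exact ⟨i, j, by omega, by omega, by omega, rfl⟩
  · rintro ⟨i, j, h1, h2, h3, rfl⟩
    exact ⟨i, ⟨by omega, by omega⟩, j, ⟨by omega, by omega⟩, rfl⟩

-- A's nested fold is the fold over the flattened product list
lemma pvA_eq_fold (N : Int) :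
    largest_palindrome_less_than N =
      pvProds.foldl (fun mp p => if p < N && is_palindrome p then max mp p else mp) (-1) := by
  have h : ∀ (l : List Int) (acc : Int),
      l.foldl (fun mp i =>
        (PySem.List.pyRange i 99 (-1)).foldl (fun mp j =>
          let product := i * j
          if product < N && is_palindrome product then max mp product else mp) mp) acc =
      (l.flatMap (fun i => (PySem.List.pyRange i 99 (-1)).map (fun j => i * j))).foldl
        (fun mp p => if p < N && is_palindrome p then max mp p else mp) acc := by
    intro l
    induction l with
    | nil => intro acc; simp
    | cons a t ih =>
        intro acc
        simp only [List.foldl_cons, List.flatMap_cons, List.foldl_append, List.foldl_map]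
        exact ih _
  exact h _ _

-- characterisation of the max-if fold
lemma pvFoldl_maxif_char (P : Int → Bool) (l : List Int) (acc : Int) :
    (l.foldl (fun m p => if P p then max m p else m) acc = acc ∨
      (l.foldl (fun m p => if P p then max m p else m) acc ∈ l ∧
       P (l.foldl (fun m p => if P p then max m p else m) acc) = true)) ∧
    acc ≤ l.foldl (fun m p => if P p then max m p else m) acc ∧
    ∀ p ∈ l, P p = true → p ≤ l.foldl (fun m p => if P p then max m p else m) acc := by
  induction l generalizing acc with
  | nil => simp
  | cons a t ih =>
      simp only [List.foldl_cons, List.mem_cons]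
      by_cases hPa : P a = true
      · simp only [hPa, if_pos]
        obtain ⟨h1, h2, h3⟩ := ih (max acc a)
        refine ⟨?_, ?_, ?_⟩
        · rcases h1 with h | h
          · rcases max_choice acc a with hm | hm
            · left; rw [h, hm]
            · right; exact ⟨Or.inl (h.trans hm), by rw [h, hm]; exact hPa⟩
          · exact Or.inr ⟨Or.inr h.1, h.2⟩
        · exact le_trans (le_max_left _ _) h2
        · rintro p (rfl | hp) hP
          · exact le_trans (le_max_right _ _) h2
          · exact h3 p hp hP
      · simp only [hPa, if_neg, Bool.false_eq_true, not_false_iff]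
        obtain ⟨h1, h2, h3⟩ := ih acc
        refine ⟨?_, h2, ?_⟩
        · rcases h1 with h | h
          · exact Or.inl h
          · exact Or.inr ⟨Or.inr h.1, h.2⟩
        · rintro p (rfl | hp) hP
          · exact absurd hP hPa
          · exact h3 p hp hP

-- in a strictly descending list, find? returns an upper bound of all hits
lemma pvFind?_desc_max (P : Int → Bool) (l : List Int) (hs : l.Pairwise (· > ·))
    {r : Int} (hf : l.find? P = some r) :
    ∀ x ∈ l, P x = true → x ≤ r := by
  induction l with
  | nil => simp
  | cons a t ih =>
      rcases List.pairwise_cons.mp hs with ⟨ha, ht⟩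
      by_cases hPa : P a = true
      · rw [List.find?_cons_of_pos hPa] at hf
        obtain rfl : a = r := by injection hf
        intro x hx hP
        rcases List.mem_cons.mp hx with rfl | hx
        · exact le_refl _
        · exact le_of_lt (ha x hx)
      · rw [List.find?_cons_of_neg (by simpa using hPa)] at hf
        intro x hx hP
        rcases List.mem_cons.mp hx with rfl | hx
        · exact absurd hP hPa
        · exact ih ht hf x hx hP

lemma pvPyRange_neg_one_desc (a b : Int) :
    (PySem.List.pyRange a b (-1)).Pairwise (· > ·) := by
  rw [PySem.List.pyRange_neg_one_eq_reverse, List.pairwise_reverse]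
  exact PySem.List.pairwise_lt_pyRange_one _ _

-- the two palindrome tests are one and the same expression
lemma pvPal_eq : pvPalB = is_palindrome := rfl

-- the factor scan succeeds exactly on numbers with a (p = i*j, 100 ≤ j ≤ i ≤ 999) factorisation,
-- given p ≥ 10000 (true on B's scan range)
lemma pvHas3Factor_iff {p : Int} (hp : 10000 ≤ p) :
    pvHas3Factor p = true ↔ ∃ i j : Int, 100 ≤ j ∧ j ≤ i ∧ i ≤ 999 ∧ p = i * j := by
  unfold pvHas3Factor
  rw [List.any_eq_true]
  constructor
  · rintro ⟨a, ha, hcond⟩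
    rw [PySem.List.mem_pyRange_one] at ha
    have hapos : (0:Int) < a := by omega
    rw [PySem.Int.mod_eq_emod_of_pos hapos, PySem.Int.floordiv_eq_ediv_of_pos hapos] at hcond
    simp only [Bool.and_eq_true, beq_iff_eq, decide_eq_true_eq] at hcond
    obtain ⟨hmod, hlo, hhi⟩ := hcond
    have hdvd : a ∣ p := Int.dvd_of_emod_eq_zero hmod
    have heq : p = a * (p / a) := (Int.mul_ediv_cancel' hdvd).symm
    rcases le_total a (p / a) with h | h
    · exact ⟨p / a, a, by omega, h, by omega, heq.trans (mul_comm _ _)⟩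
    · exact ⟨a, p / a, by omega, h, by omega, heq⟩
  · rintro ⟨i, j, h1, h2, h3, rfl⟩
    refine ⟨j, ?_, ?_⟩
    · rw [PySem.List.mem_pyRange_one]; omega
    · have hjpos : (0:Int) < j := by omega
      rw [PySem.Int.mod_eq_emod_of_pos hjpos, PySem.Int.floordiv_eq_ediv_of_pos hjpos]
      have hmod : i * j % j = 0 := Int.mul_emod_left i j
      have hdiv : i * j / j = i := Int.mul_ediv_cancel i (by omega)
      simp only [hmod, hdiv, Bool.and_eq_true, beq_iff_eq, decide_eq_true_eq, true_and]
      exact ⟨by omega, by omega⟩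

-- products of two 3-digit factors lie in [10000, 998001]
lemma pvProd_bounds {i j : Int} (h1 : 100 ≤ j) (h2 : j ≤ i) (h3 : i ≤ 999) :
    10000 ≤ i * j ∧ i * j ≤ 998001 := by
  constructor
  · have : (100:Int) * 100 ≤ i * j :=
      mul_le_mul (by omega) h1 (by omega) (by omega)
    omega
  · have : i * j ≤ 999 * 999 :=
      mul_le_mul h3 (by omega) (by omega) (by omega)
    omega

-- the two filters pick out the same numbers
lemma pvMem_iff (N p : Int) :
    (p ∈ pvProds ∧ (decide (p < N) && is_palindrome p) = true) ↔
    (p ∈ PySem.List.pyRange (min (N - 1) (999 * 999)) 9999 (-1) ∧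
     (pvPalB p && pvHas3Factor p) = true) := by
  simp only [PySem.List.mem_pyRange_neg_one, Bool.and_eq_true, decide_eq_true_eq, pvPal_eq]
  constructor
  · rintro ⟨hmem, hlt, hpal⟩
    obtain ⟨i, j, h1, h2, h3, rfl⟩ := pvMem_prods.mp hmem
    obtain ⟨hlo, hhi⟩ := pvProd_bounds h1 h2 h3
    refine ⟨⟨by omega, by omega⟩, hpal, ?_⟩
    exact (pvHas3Factor_iff hlo).mpr ⟨i, j, h1, h2, h3, rfl⟩
  · rintro ⟨⟨hlo, hhi⟩, hpal, hfac⟩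
    obtain ⟨i, j, h1, h2, h3, rfl⟩ := (pvHas3Factor_iff (by omega)).mp hfac
    exact ⟨pvMem_prods.mpr ⟨i, j, h1, h2, h3, rfl⟩, by omega, hpal⟩

-- ===== VERDICT (by name: the statement is the Claim_ definition above) =====
set_option maxRecDepth 4000 in
theorem largest_palindrome_less_than_spec : Claim_equal_largest_palindrome_less_than := by
  intro N _
  unfold Spec_largest_palindrome_less_than
  rw [pvA_eq_fold]
  set P : Int → Bool := fun p => decide (p < N) && is_palindrome p with hP
  have hfold :
      pvProds.foldl (fun mp p => if p < N && is_palindrome p then max mp p else mp) (-1) =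
      pvProds.foldl (fun mp p => if P p then max mp p else mp) (-1) := by
    simp [hP]
  rw [hfold]
  obtain ⟨h1, _, h3⟩ := pvFoldl_maxif_char P pvProds (-1)
  set A := pvProds.foldl (fun mp p => if P p then max mp p else mp) (-1) with hA
  set l := PySem.List.pyRange (min (N - 1) (999 * 999)) 9999 (-1) with hl
  unfold largest_palindrome_less_than_alt
  rw [← hl]
  cases hfind : l.find? (fun p => pvPalB p && pvHas3Factor p) with
  | none =>
      rw [List.find?_eq_none] at hfind
      rcases h1 with h | ⟨hmem, hPA⟩
      · exact h
      · exfalso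
        obtain ⟨hmemB, hpredB⟩ := (pvMem_iff N A).mp ⟨hmem, hPA⟩
        exact hfind A hmemB hpredB
  | some r =>
      have hrP : (pvPalB r && pvHas3Factor r) = true := by
        simpa using List.find?_some hfind
      have hrMem : r ∈ l := List.mem_of_find?_eq_some hfind
      obtain ⟨hrProds, hrPA⟩ := (pvMem_iff N r).mpr ⟨hrMem, hrP⟩
      have hrange : 9999 < r := by
        rw [hl, PySem.List.mem_pyRange_neg_one] at hrMem; omega
      have hrA : r ≤ A := h3 r hrProds hrPA
      show A = r
      rcases h1 with h | ⟨hmem, hPA⟩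
      · omega
      · obtain ⟨hmemB, hpredB⟩ := (pvMem_iff N A).mp ⟨hmem, hPA⟩
        have hdesc : l.Pairwise (· > ·) := by
          rw [hl]; exact pvPyRange_neg_one_desc _ _
        have hAr : A ≤ r := pvFind?_desc_max _ l hdesc hfind A hmemB hpredB
        omega
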